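-- pv_equiv track=rewrite | github.com/adam-bunce/slop | cp_sat/magic_hexagon.py | gen_board
-- ===== SOURCE A (Python) =====
-- from typing import Tuple
--
-- def gen_board(order: int) -> Tuple[list[list[str]], list[int]]:
--     board, padding = [], []
--     curr_padding, curr_cols = 0, order
--     rows = order * 2 - 1
--     decrease_flag = False
--
--     for row in range(rows):
--         row_vals = []
--         for col in range(curr_cols):
--             row_vals.append(f"{row}:{col}")
--
--         board.append(row_vals)
--
--         if row == order - 1:
--             decrease_flag = True
--
--         if decrease_flag:
--             padding.append(curr_padding)
--             curr_cols -= 1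
--             curr_padding += 1
--         else:
--             padding.append(0)
--             curr_cols += 1
--
--     return board, padding
-- ===== SOURCE B (Python) =====
-- def gen_board(order):
--     rows = order * 2 - 1
--     board = [[f"{row}:{col}" for col in range(order + row if row < order else 3 * order - 2 - row)]
--              for row in range(rows)]
--     padding = [0 if row < order else row - order + 1 for row in range(rows)]
--     return board, padding
-- ===== Notes on version B (the rewrite author's own statement) =====
-- stated objective: simpler
-- what changed: Replaced A's threaded mutable state (curr_cols, curr_padding, decrease_flag) over one stateful loop with two stateless comprehensions computing each row's column count and padding by closed-form per-row formulas.
import Mathlib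
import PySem

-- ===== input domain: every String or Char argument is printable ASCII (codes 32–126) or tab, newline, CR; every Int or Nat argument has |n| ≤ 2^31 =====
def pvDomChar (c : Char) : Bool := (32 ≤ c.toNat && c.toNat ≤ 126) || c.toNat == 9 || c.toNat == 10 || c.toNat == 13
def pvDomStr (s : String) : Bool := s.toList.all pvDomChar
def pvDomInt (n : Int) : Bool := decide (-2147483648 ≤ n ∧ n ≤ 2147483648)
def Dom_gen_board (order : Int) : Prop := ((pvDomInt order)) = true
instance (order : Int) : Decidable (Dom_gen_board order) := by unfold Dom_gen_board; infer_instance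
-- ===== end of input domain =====

-- B replaces A's mutable accumulator state (curr_cols, curr_padding, decrease_flag)
-- by closed-form per-row formulas; objective: simpler, same cost.

-- ===== PORT A =====
-- state: (board, padding, curr_padding, curr_cols, decrease_flag)
def genBoardStep (order : Int)
    (s : List (List String) × List Int × Int × Int × Bool) (row : Int) :
    List (List String) × List Int × Int × Int × Bool :=
  let row_vals := (PySem.List.pyRange 0 s.2.2.2.1 1).foldl
    (fun acc col => acc ++ [PySem.Int.toStr row ++ ":" ++ PySem.Int.toStr col]) []
  let board := s.1 ++ [row_vals]
  let flag := if row == order - 1 then true else s.2.2.2.2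
  if flag then (board, s.2.1 ++ [s.2.2.1], s.2.2.1 + 1, s.2.2.2.1 - 1, true)
  else (board, s.2.1 ++ [(0 : Int)], s.2.2.1, s.2.2.2.1 + 1, flag)

def gen_board (order : Int) : List (List String) × List Int :=
  let rows := order * 2 - 1
  let st := (PySem.List.pyRange 0 rows 1).foldl (genBoardStep order) ([], [], 0, order, false)
  (st.1, st.2.1)

-- ===== PORT B =====
def genBoardRow (order row : Int) : List String :=
  (PySem.List.pyRange 0 (if row < order then order + row else 3 * order - 2 - row) 1).map
    (fun col => PySem.Int.toStr row ++ ":" ++ PySem.Int.toStr col)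

def genBoardPad (order row : Int) : Int :=
  if row < order then 0 else row - order + 1

def gen_board_alt (order : Int) : List (List String) × List Int :=
  let rowsIdx := PySem.List.pyRange 0 (order * 2 - 1) 1
  (rowsIdx.map (genBoardRow order), rowsIdx.map (genBoardPad order))

-- ===== PRECONDITION & SPEC =====
def Spec_gen_board (order : Int) (out : List (List String) × List Int) : Prop := out = gen_board_alt order
instance (order : Int) (out : List (List String) × List Int) : Decidable (Spec_gen_board order out) := by unfold Spec_gen_board; infer_instance

-- ===== CLAIM (what is proved, stated in full; the proofs are below) =====
def Claim_equal_gen_board : Prop := ∀ (order : Int), Dom_gen_board order → Spec_gen_board order (gen_board order)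

-- ===== LEMMAS AND PROOFS =====

lemma foldl_append_singleton {α β : Type} (g : α → β) :
    ∀ (l : List α) (acc : List β),
      l.foldl (fun acc c => acc ++ [g c]) acc = acc ++ l.map g := by
  intro l
  induction l with
  | nil => simp
  | cons x xs ih => intro acc; simp [List.foldl, ih]

lemma flatten_map_singleton {α β : Type} (g : α → β) :
    ∀ (l : List α), (l.map (fun x => [g x])).flatten = l.map g := by
  intro l; induction l with
  | nil => simp
  | cons x xs ih => simp [ih]

-- invariant: state after the first k iterations of A's loop
lemma gen_board_inv (order : Int) (k : Nat) (hk : (k : Int) ≤ order * 2 - 1) :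
    (PySem.List.pyRange 0 (k : Int) 1).foldl (genBoardStep order) ([], [], 0, order, false)
      = ((PySem.List.pyRange 0 (k : Int) 1).map (genBoardRow order),
         (PySem.List.pyRange 0 (k : Int) 1).map (genBoardPad order),
         (if (k : Int) < order then 0 else (k : Int) - order + 1),
         (if (k : Int) < order then order + (k : Int) else 3 * order - 2 - (k : Int)),
         decide (order ≤ (k : Int))) := by
  induction k with
  | zero =>
      have h0 : (0 : Int) < order := by omega
      simp [PySem.List.pyRange_zero_nat, h0, not_le.mpr h0]
  | succ n ih =>
      have hn : (n : Int) ≤ order * 2 - 1 := by push_cast at hk ⊢; omega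
      have hsplit : PySem.List.pyRange 0 ((n : Int) + 1) 1
          = PySem.List.pyRange 0 (n : Int) 1 ++ [(n : Int)] :=
        PySem.List.pyRange_one_succ_right (by positivity)
      have hcast : ((n + 1 : Nat) : Int) = (n : Int) + 1 := by push_cast; ring
      rw [hcast, hsplit, List.foldl_append, List.map_append, List.map_append, ih hn]
      simp only [List.foldl]
      unfold genBoardStep
      rcases lt_trichotomy ((n : Int) + 1) order with h | h | h
      · -- n + 1 < order : still growing, flag stays false
        have h1 : (n : Int) < order := by omega
        have h2 : ¬ ((n : Int) = order - 1) := by omega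
        have h3 : ¬ (order ≤ (n : Int)) := by omega
        simp [h1, h2, h3, h, genBoardRow, genBoardPad,
              foldl_append_singleton, flatten_map_singleton]
        omega
      · -- n + 1 = order : this row sets the flag
        have h1 : (n : Int) < order := by omega
        have h2 : (n : Int) = order - 1 := by omega
        have h4 : ¬ ((n : Int) + 1 < order) := by omega
        simp [h1, h2, h4, genBoardRow, genBoardPad,
              foldl_append_singleton, flatten_map_singleton]
        omega
      · -- order < n + 1 : decreasing phase
        have h1 : ¬ ((n : Int) < order) := by omega
        have h3 : order ≤ (n : Int) := by omega
        have h4 : ¬ ((n : Int) + 1 < order) := by omega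
        by_cases h2 : (n : Int) = order - 1
        · omega
        · simp [h1, h2, h3, h4, genBoardRow, genBoardPad,
                foldl_append_singleton, flatten_map_singleton]
          constructor <;> omega

-- ===== VERDICT (by name: the statement is the Claim_ definition above) =====
theorem gen_board_spec : Claim_equal_gen_board := by
  intro order _
  unfold Spec_gen_board gen_board gen_board_alt
  by_cases h : order * 2 - 1 ≤ 0
  · simp [PySem.List.pyRange_one_eq_nil h]
  · push Not at h
    have hk : ((order * 2 - 1).toNat : Int) = order * 2 - 1 := Int.toNat_of_nonneg (by omega)
    have := gen_board_inv order (order * 2 - 1).toNat (by omega)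
    rw [hk] at this
    simp only [this]
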